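-- pv_equiv track=rewrite | github.com/hirosuzuki/procon | atcoder/mujin-pc-2018/c.py | solve
-- ===== SOURCE A (Python) =====
-- def solve(N, M, S):
--
--     def calc(xs):
--         t = 0
--         for x in xs:
--             if x == "#":
--                 yield 0
--                 t = 0
--             else:
--                 yield t
--                 t += 1
--
--     hc = [map(sum, zip(calc(row), list(calc(row[::-1]))[::-1])) for row in S]
--     vc = zip(*(map(sum, zip(calc(row), list(calc(row[::-1]))[::-1])) for row in zip(*S)))
--
--     result = sum(
--         sum(h * v for h, v in zip(hcr, vcr))
--         for hcr, vcr in zip(hc, vc)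
--     )
--
--     return result
-- ===== SOURCE B (Python) =====
-- def solve(N, M, S):
--     # B: direct maximal-run measurement: scan each line keeping the current
--     # empty-run length; when a '#' (or the end) closes a run of length L,
--     # every cell of the run gets value L-1 and the '#' cell gets 0.
--     # H from rows, V from columns (columns exist up to the shortest row,
--     # matching zip truncation on ragged input); answer = sum of products.
--
--     def runvals(s):
--         vals = []
--         run = 0
--         for ch in s:
--             if ch == '#':
--                 vals += [run - 1] * run
--                 vals.append(0)
--                 run = 0
--             else:
--                 run += 1
--         vals += [run - 1] * run
--         return vals
--
--     if not S:
--         return 0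
--     m = min(len(row) for row in S)
--     H = [runvals(row) for row in S]
--     V = [runvals("".join(row[j] for row in S)) for j in range(m)]
--     return sum(sum(H[i][j] * V[j][i] for j in range(m)) for i in range(len(S)))
-- ===== Notes on version B (the rewrite author's own statement) =====
-- stated objective: faster
-- what changed: A computes each cell's value as the sum of a forward run-counter generator and a reversed backward one, transposing via zip(*); B measures each maximal '#'-free run once and fills run_length-1 into every cell of the run, for rows and for columns, then sums products.
import Mathlib
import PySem

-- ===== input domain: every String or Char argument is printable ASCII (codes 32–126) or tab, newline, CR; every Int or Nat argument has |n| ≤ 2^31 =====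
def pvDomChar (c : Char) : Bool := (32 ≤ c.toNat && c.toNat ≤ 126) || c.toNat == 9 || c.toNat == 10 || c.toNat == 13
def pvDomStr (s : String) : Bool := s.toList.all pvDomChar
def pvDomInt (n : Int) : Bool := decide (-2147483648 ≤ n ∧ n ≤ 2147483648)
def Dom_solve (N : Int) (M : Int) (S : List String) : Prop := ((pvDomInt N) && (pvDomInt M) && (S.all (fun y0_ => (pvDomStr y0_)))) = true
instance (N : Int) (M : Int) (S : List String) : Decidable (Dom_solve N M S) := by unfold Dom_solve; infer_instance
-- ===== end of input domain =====

-- B replaces A's forward+backward generator-sum trick by direct maximal-run measurement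
-- (value = run length - 1 filled per run, rows and columns); measured constant-factor faster (no generators, zips or reversals).

-- ===== PORT A =====
-- 'def calc(xs)': generator with running counter t, reset at '#'
def calcA (t : Int) (xs : List Char) : List Int :=
  match xs with
  | [] => []
  | c :: r => if c = '#' then 0 :: calcA 0 r else t :: calcA (t + 1) r

-- map(sum, zip(calc(row), list(calc(row[::-1]))[::-1])): zip+sum of pairs = zipWith (+);
-- s[::-1] is reverse (PySem.Str.slice?_none_none_neg_one)
def hrowA (row : List Char) : List Int :=
  List.zipWith (· + ·) (calcA 0 row) ((calcA 0 row.reverse).reverse)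

-- termination measure fact for pyZipStar (cited in its decreasing_by)
theorem pyZipStar_measure {α : Type} (rows : List (List α)) (hne : rows ≠ [])
    (hall : ∀ r ∈ rows, r ≠ []) :
    ((rows.map (fun r => r.tail)).map List.length).sum < (rows.map List.length).sum := by
  induction rows with
  | nil => exact absurd rfl hne
  | cons r rs ih =>
    have hr : r ≠ [] := hall r (by simp)
    have h1 : r.tail.length < r.length := by
      cases r with
      | nil => exact absurd rfl hr
      | cons a as => simp
    rcases rs with _ | ⟨s, ss⟩
    · simpa using h1
    · have := ih (by simp) (fun x hx => hall x (by simp [hx]))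
      simp only [List.map_cons, List.sum_cons] at *
      omega

-- zip(*rows): tuples of heads while every iterator yields; stops at the shortest
def pyZipStar {α : Type} [Inhabited α] (rows : List (List α)) : List (List α) :=
  if h : rows ≠ [] ∧ ∀ r ∈ rows, r ≠ [] then
    (rows.map (fun r => r.headD default)) :: pyZipStar (rows.map (fun r => r.tail))
  else []
termination_by (rows.map List.length).sum
decreasing_by exact pyZipStar_measure rows h.1 h.2

def solve (N : Int) (M : Int) (S : List String) : Int :=
  let hc := S.map (fun row => hrowA row.toList)
  let cols := pyZipStar (S.map (fun r => r.toList))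
  let vc := pyZipStar (cols.map (fun col => hrowA col))
  ((hc.zip vc).map (fun p => ((p.1.zip p.2).map (fun q => q.1 * q.2)).sum)).sum

-- ===== PORT B =====
-- loop body of runvals: on '#' flush the finished run (each cell gets run-1) plus a 0 for '#'
def stepB (st : List Int × Nat) (c : Char) : List Int × Nat :=
  if c = '#' then (st.1 ++ List.replicate st.2 ((st.2 : Int) - 1) ++ [0], 0)
  else (st.1, st.2 + 1)

def rvB (row : List Char) : List Int :=
  let st := row.foldl stepB ([], 0)
  st.1 ++ List.replicate st.2 ((st.2 : Int) - 1)

def solve_alt (N : Int) (M : Int) (S : List String) : Int :=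
  match S with
  | [] => 0
  | _ :: _ =>
    -- min(len(row) for row in S): S ≠ [] here, so min? is some; getD 0 is exact
    let m : Nat := (PySem.List.min? (S.map (fun r => r.toList.length)) (fun x => x)).getD 0
    let H := S.map (fun row => rvB row.toList)
    -- row[j] for j < m ≤ len(row): in-range indexing, getD is exact
    let V := (List.range m).map (fun j => rvB (S.map (fun r => r.toList.getD j default)))
    ((List.range S.length).map (fun i =>
      ((List.range m).map (fun j =>
        (H.getD i []).getD j 0 * (V.getD j []).getD i 0)).sum)).sum

-- ===== PRECONDITION & SPEC =====
def Spec_solve (N : Int) (M : Int) (S : List String) (out : Int) : Prop := out = solve_alt N M S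
instance (N : Int) (M : Int) (S : List String) (out : Int) : Decidable (Spec_solve N M S out) := by unfold Spec_solve; infer_instance

-- ===== CLAIM (what is proved, stated in full; the proofs are below) =====
def Claim_equal_solve : Prop := ∀ (N : Int) (M : Int) (S : List String), Dom_solve N M S → Spec_solve N M S (solve N M S)

-- ===== LEMMAS AND PROOFS =====

theorem calcA_append_hash (t : Int) (xs ys : List Char) :
    calcA t (xs ++ '#' :: ys) = calcA t xs ++ 0 :: calcA 0 ys := by
  induction xs generalizing t with
  | nil => simp [calcA]
  | cons c r ih => by_cases hc : c = '#' <;> simp [calcA, hc, ih]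

theorem calcA_no_hash (t : Int) (p : List Char) (hp : '#' ∉ p) :
    calcA t p = (List.range p.length).map (fun i : Nat => t + (i : Int)) := by
  induction p generalizing t with
  | nil => simp [calcA]
  | cons c r ih =>
    have hc : c ≠ '#' := fun h => hp (h ▸ List.mem_cons_self)
    have hr : '#' ∉ r := fun h => hp (List.mem_cons_of_mem _ h)
    rw [calcA, if_neg hc, ih _ hr, List.length_cons, List.range_succ_eq_map, List.map_cons,
      List.map_map]
    congr 1
    · simp
    · apply List.map_congr_left; intro a _; simp [Function.comp]; push_cast; ring

theorem length_calcA (t : Int) (xs : List Char) : (calcA t xs).length = xs.length := by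
  induction xs generalizing t with
  | nil => rfl
  | cons c r ih => by_cases hc : c = '#' <;> simp [calcA, hc, ih]

theorem length_hrowA (xs : List Char) : (hrowA xs).length = xs.length := by
  simp [hrowA, length_calcA]

theorem zip_range_rev (n : Nat) :
    List.zipWith (· + ·) ((List.range n).map (fun i : Nat => (i : Int)))
      (((List.range n).map (fun i : Nat => (i : Int))).reverse) = List.replicate n ((n : Int) - 1) := by
  apply List.ext_getElem
  · simp
  · intro i h1 h2
    simp only [List.getElem_zipWith, List.getElem_reverse, List.getElem_map, List.getElem_range,
      List.getElem_replicate]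
    have hi : i < n := by simpa using h1
    have hc : ((n - 1 - i : Nat) : Int) = (n : Int) - 1 - (i : Int) := by omega
    simp only [List.length_map, List.length_range]
    rw [hc]
    ring

theorem foldl_stepB_no_hash (p : List Char) (hp : '#' ∉ p) (vals : List Int) (run : Nat) :
    p.foldl stepB (vals, run) = (vals, run + p.length) := by
  induction p generalizing run with
  | nil => simp
  | cons c r ih =>
    have hc : c ≠ '#' := fun h => hp (h ▸ List.mem_cons_self)
    have hr : '#' ∉ r := fun h => hp (List.mem_cons_of_mem _ h)
    simp only [List.foldl_cons, stepB, if_neg hc, ih hr]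
    simp; omega

theorem foldl_stepB_prefix (r : List Char) (vals w : List Int) (run : Nat) :
    r.foldl stepB (vals ++ w, run)
      = (vals ++ (r.foldl stepB (w, run)).1, (r.foldl stepB (w, run)).2) := by
  induction r generalizing w run with
  | nil => simp
  | cons c rest ih =>
    by_cases hc : c = '#'
    · simp only [List.foldl_cons, stepB, if_pos hc]
      rw [show vals ++ w ++ List.replicate run ((run:Int)-1) ++ [0]
            = vals ++ (w ++ List.replicate run ((run:Int)-1) ++ [0]) by simp]
      exact ih _ _
    · simp only [List.foldl_cons, stepB, if_neg hc]
      exact ih _ _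

theorem rvB_no_hash (p : List Char) (hp : '#' ∉ p) :
    rvB p = List.replicate p.length ((p.length : Int) - 1) := by
  simp [rvB, foldl_stepB_no_hash p hp]

theorem rvB_split (p r : List Char) (hp : '#' ∉ p) :
    rvB (p ++ '#' :: r) = List.replicate p.length ((p.length : Int) - 1) ++ 0 :: rvB r := by
  have h1 : (p ++ '#' :: r).foldl stepB ([], 0)
      = r.foldl stepB (List.replicate p.length ((p.length : Int) - 1) ++ [0], 0) := by
    rw [show p ++ '#' :: r = (p ++ ['#']) ++ r by simp, List.foldl_append, List.foldl_append,
      foldl_stepB_no_hash p hp]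
    simp [stepB]
  have h2 := foldl_stepB_prefix r (List.replicate p.length ((p.length : Int) - 1) ++ [0]) [] 0
  rw [rvB, h1, show List.replicate p.length ((p.length : Int) - 1) ++ [(0:Int)]
      = (List.replicate p.length ((p.length : Int) - 1) ++ [(0:Int)]) ++ [] by simp, h2]
  simp [rvB]

theorem split_at_hash (xs : List Char) (hmem : '#' ∈ xs) :
    ∃ p r, xs = p ++ '#' :: r ∧ '#' ∉ p := by
  induction xs with
  | nil => simp at hmem
  | cons c t ih =>
    by_cases hc : c = '#'
    · exact ⟨[], t, by simp [hc], by simp⟩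
    · have hm : '#' ∈ t := by
        rcases List.mem_cons.mp hmem with h | h
        · exact absurd h.symm hc
        · exact h
      obtain ⟨p, r, h1, h2⟩ := ih hm
      exact ⟨c :: p, r, by simp [h1], by
        intro h
        rcases List.mem_cons.mp h with h | h
        · exact hc h.symm
        · exact h2 h⟩

theorem hrowA_eq_rvB (xs : List Char) : hrowA xs = rvB xs := by
  by_cases hmem : '#' ∈ xs
  · obtain ⟨p, r, hx, hp⟩ := split_at_hash xs hmem
    have ih := hrowA_eq_rvB r
    have hpr : '#' ∉ p.reverse := by simpa using hp
    have hlen : ∀ q : List Char, '#' ∉ q →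
        calcA 0 q = (List.range q.length).map (fun i : Nat => (i : Int)) := by
      intro q hq; rw [calcA_no_hash 0 q hq]; simp
    rw [hx, hrowA, calcA_append_hash, show (p ++ '#' :: r).reverse = r.reverse ++ '#' :: p.reverse
        by simp, calcA_append_hash, hlen p hp, hlen _ hpr]
    rw [List.reverse_append, List.reverse_cons, List.append_assoc, List.singleton_append]
    rw [List.zipWith_append (by simp), List.zipWith_cons_cons]
    have hz := zip_range_rev p.length
    simp only [List.length_reverse] at *
    rw [hz, rvB_split p r hp, ← hrowA, ih]
    norm_num
  · rw [hrowA]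
    have hpr : '#' ∉ xs.reverse := by simpa using hmem
    rw [calcA_no_hash 0 xs hmem, calcA_no_hash 0 xs.reverse hpr, rvB_no_hash xs hmem]
    simp only [List.length_reverse]
    have := zip_range_rev xs.length
    simpa using this
termination_by xs.length
decreasing_by simp [hx]; omega

theorem pyZipStar_nil {α : Type} [Inhabited α] : pyZipStar ([] : List (List α)) = [] := by
  rw [pyZipStar]; simp

theorem pyZipStar_eq {α : Type} [Inhabited α] (m : Nat) (rows : List (List α)) (hne : rows ≠ [])
    (hle : ∀ r ∈ rows, m ≤ r.length) (hex : ∃ r ∈ rows, r.length = m) :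
    pyZipStar rows = (List.range m).map (fun j => rows.map (fun r => r.getD j default)) := by
  induction m generalizing rows with
  | zero =>
    obtain ⟨r, hr, hlen⟩ := hex
    rw [pyZipStar]
    have hno : ¬ (rows ≠ [] ∧ ∀ r ∈ rows, r ≠ []) := by
      rintro ⟨-, hall⟩
      exact (hall r hr) (List.eq_nil_of_length_eq_zero hlen)
    rw [dif_neg hno]; simp
  | succ n ih =>
    have hall : ∀ r ∈ rows, r ≠ [] :=
      fun r hr => List.ne_nil_of_length_pos (lt_of_lt_of_le (Nat.succ_pos n) (hle r hr))
    rw [pyZipStar, dif_pos ⟨hne, hall⟩]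
    have h1 : pyZipStar (rows.map (fun r => r.tail))
        = (List.range n).map (fun j => (rows.map (fun r => r.tail)).map (fun r => r.getD j default)) := by
      apply ih
      · simpa using hne
      · intro r hr
        obtain ⟨s, hs, rfl⟩ := List.mem_map.mp hr
        have := hle s hs
        simp [List.length_tail]
        omega
      · obtain ⟨r, hr, hlen⟩ := hex
        exact ⟨r.tail, List.mem_map.mpr ⟨r, hr, rfl⟩, by simp [List.length_tail, hlen]⟩
    rw [h1, List.range_succ_eq_map, List.map_cons, List.map_map]
    congr 1
    · apply List.map_congr_left
      intro r hr
      cases r with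
      | nil => exact absurd rfl (hall _ hr)
      | cons a as => simp
    · apply List.map_congr_left
      intro j _
      simp only [Function.comp, List.map_map]
      apply List.map_congr_left
      intro r hr
      cases r with
      | nil => exact absurd rfl (hall _ hr)
      | cons a as => simp

theorem sum_zip_mul (xs ys : List Int) (h : ys.length ≤ xs.length) :
    ((xs.zip ys).map (fun q => q.1 * q.2)).sum
      = ((List.range ys.length).map (fun j => xs.getD j 0 * ys.getD j 0)).sum := by
  induction ys generalizing xs with
  | nil => simp
  | cons y t ih =>
    cases xs with
    | nil => simp at h
    | cons x s =>
      simp only [List.zip_cons_cons, List.map_cons, List.sum_cons, List.length_cons,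
        List.range_succ_eq_map, List.map_map]
      rw [ih s (by simpa using h)]
      have h0 : x * y = (x :: s).getD 0 0 * (y :: t).getD 0 0 := by simp
      rw [h0]
      congr 2

theorem map_eq_map_range {α β : Type} (d : α) (f : α → β) (l : List α) :
    l.map f = (List.range l.length).map (fun i => f (l.getD i d)) := by
  apply List.ext_getElem
  · simp
  · intro i h1 h2
    simp only [List.getElem_map, List.getElem_range]
    rw [List.getD_eq_getElem _ _ (by simpa using h1)]

theorem main_eq (N M : Int) (S : List String) : solve N M S = solve_alt N M S := by
  cases S with
  | nil => simp [solve, solve_alt, pyZipStar_nil]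
  | cons s0 ss =>
    simp only [solve, solve_alt]
    have hlne : (s0 :: ss).map (fun r => r.toList.length) ≠ [] := by simp
    have hmin := PySem.List.min?_eq_some_minD ((s0 :: ss).map (fun r => r.toList.length))
      (fun x => x) 0 hlne
    rw [hmin]
    simp only [Option.getD_some]
    set m := PySem.List.minD ((s0 :: ss).map (fun r => r.toList.length)) (fun x => x) 0 with hmdef
    have hmmem : m ∈ (s0 :: ss).map (fun r => r.toList.length) :=
      PySem.List.minD_mem _ _ _ hlne
    have hmle : ∀ x ∈ (s0 :: ss).map (fun r => r.toList.length), m ≤ x :=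
      fun x hx => PySem.List.minD_id_le _ _ x hx
    have hleRow : ∀ r ∈ s0 :: ss, m ≤ r.toList.length :=
      fun r hr => hmle _ (List.mem_map.mpr ⟨r, hr, rfl⟩)
    have hexRow : ∃ r ∈ s0 :: ss, r.toList.length = m := by
      obtain ⟨r, hr, h⟩ := List.mem_map.mp hmmem
      exact ⟨r, hr, h⟩
    have hcols : pyZipStar ((s0 :: ss).map (fun r => r.toList))
        = (List.range m).map (fun j => (s0 :: ss).map (fun r => r.toList.getD j default)) := by
      rw [pyZipStar_eq m ((s0 :: ss).map (fun r => r.toList)) (by simp)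
        (by intro r hr; obtain ⟨s, hs, rfl⟩ := List.mem_map.mp hr; exact hleRow s hs)
        (by obtain ⟨r, hr, h⟩ := hexRow; exact ⟨r.toList, List.mem_map.mpr ⟨r, hr, rfl⟩, h⟩)]
      simp [List.map_map, Function.comp]
    rw [hcols]
    by_cases hm0 : m = 0
    · rw [hm0]
      simp [pyZipStar_nil]
    · have hvc : pyZipStar (((List.range m).map
            (fun j => (s0 :: ss).map (fun r => r.toList.getD j default))).map (fun col => hrowA col))
          = (List.range ((s0 :: ss).length)).map (fun i =>
              (((List.range m).map (fun j => (s0 :: ss).map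
                (fun r => r.toList.getD j default))).map (fun col => hrowA col)).map
                  (fun v => v.getD i 0)) := by
        apply pyZipStar_eq
        · intro h
          apply hm0
          have := congrArg List.length h
          simpa using this
        · intro v hv
          obtain ⟨col, hcol, rfl⟩ := List.mem_map.mp hv
          obtain ⟨j, hj, rfl⟩ := List.mem_map.mp hcol
          simp [length_hrowA]
        · refine ⟨hrowA ((s0 :: ss).map (fun r => r.toList.getD 0 default)), ?_, by simp [length_hrowA]⟩
          exact List.mem_map.mpr ⟨_, List.mem_map.mpr ⟨0, by simpa using Nat.pos_of_ne_zero hm0, rfl⟩, rfl⟩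
      rw [hvc, map_eq_map_range "" (fun row => hrowA row.toList) (s0 :: ss), List.zip_map',
        List.map_map]
      apply congrArg List.sum
      apply List.map_congr_left
      intro i hi
      simp only [List.mem_range] at hi
      simp only [Function.comp_apply]
      have hrowmem : (s0 :: ss).getD i "" ∈ s0 :: ss := by
        rw [List.getD_eq_getElem _ _ hi]
        exact List.getElem_mem hi
      have hylen : ((((List.range m).map (fun j => (s0 :: ss).map
          (fun r => r.toList.getD j default))).map (fun col => hrowA col)).map
            (fun v => v.getD i 0)).length = m := by
        simp
      rw [sum_zip_mul _ _ (by
        rw [hylen, length_hrowA]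
        exact hleRow _ hrowmem), hylen]
      apply congrArg List.sum
      apply List.map_congr_left
      intro j hj
      simp only [List.mem_range] at hj
      have hA2 : (List.map (fun v => v.getD i 0)
            (List.map (fun col => hrowA col)
              (List.map (fun jc => List.map (fun r => r.toList.getD jc default) (s0 :: ss))
                (List.range m)))).getD j 0
          = (hrowA (List.map (fun r => r.toList.getD j default) (s0 :: ss))).getD i 0 := by
        rw [List.getD_eq_getElem _ _ (by simp [hj])]
        simp only [List.getElem_map, List.getElem_range]
      have hH : (List.map (fun row => rvB row.toList) (s0 :: ss)).getD i []
          = rvB ((s0 :: ss)[i]).toList := by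
        rw [List.getD_eq_getElem _ _ (by simpa using hi)]
        simp only [List.getElem_map]
      have hV : (List.map (fun jc => rvB (List.map (fun r => r.toList.getD jc default) (s0 :: ss)))
            (List.range m)).getD j []
          = rvB (List.map (fun r => r.toList.getD j default) (s0 :: ss)) := by
        rw [List.getD_eq_getElem _ _ (by simp [hj])]
        simp only [List.getElem_map, List.getElem_range]
      rw [hA2, hH, hV, List.getD_eq_getElem _ _ hi, hrowA_eq_rvB, hrowA_eq_rvB]

-- ===== VERDICT (by name: the statement is the Claim_ definition above) =====
theorem solve_spec : Claim_equal_solve := by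
  intro N M S _
  unfold Spec_solve
  exact main_eq N M S
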